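-- pv_equiv track=rewrite | github.com/thee-grinch/MamaToto | utils.py | get_baby_size
-- ===== SOURCE A (Python) =====
-- def get_baby_size(week: int) -> str:
--     """Get baby size comparison for the week"""
--     size_comparisons = {
--         4: "poppy seed", 6: "lentil", 8: "raspberry", 10: "strawberry",
--         12: "lime", 16: "avocado", 20: "banana", 24: "ear of corn",
--         28: "eggplant", 32: "squash", 36: "cantaloupe", 40: "watermelon"
--     }
--
--     for w in sorted(size_comparisons.keys(), reverse=True):
--         if week >= w:
--             return size_comparisons[w]
--     return "tiny seed"
-- ===== SOURCE B (Python) =====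
-- _THRESHOLDS = [4, 6, 8, 10, 12, 16, 20, 24, 28, 32, 36, 40]
-- _NAMES = ["poppy seed", "lentil", "raspberry", "strawberry", "lime", "avocado",
--           "banana", "ear of corn", "eggplant", "squash", "cantaloupe", "watermelon"]
--
--
-- def get_baby_size(week: int) -> str:
--     """Get baby size comparison for the week (binary search over ascending thresholds)."""
--     lo, hi = 0, len(_THRESHOLDS)
--     while lo < hi:
--         mid = (lo + hi) // 2
--         if _THRESHOLDS[mid] <= week:
--             lo = mid + 1
--         else:
--             hi = mid
--     return "tiny seed" if lo == 0 else _NAMES[lo - 1]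
-- ===== Notes on version B (the rewrite author's own statement) =====
-- stated objective: alternative
-- what changed: Replaces the descending linear scan over a dict's reverse-sorted keys with a hand-rolled bisect_right binary search over an ascending threshold list paired with a parallel name list.
import Mathlib
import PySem

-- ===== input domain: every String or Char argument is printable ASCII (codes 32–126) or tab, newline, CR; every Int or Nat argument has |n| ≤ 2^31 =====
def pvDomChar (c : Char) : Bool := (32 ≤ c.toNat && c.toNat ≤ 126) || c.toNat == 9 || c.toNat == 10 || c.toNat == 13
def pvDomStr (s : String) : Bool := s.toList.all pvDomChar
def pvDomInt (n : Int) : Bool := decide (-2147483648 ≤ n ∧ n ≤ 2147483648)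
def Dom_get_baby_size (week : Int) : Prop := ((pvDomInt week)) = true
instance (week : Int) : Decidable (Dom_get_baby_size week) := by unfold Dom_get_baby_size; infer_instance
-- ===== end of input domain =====

-- ===== PORT A =====
-- B replaces A's descending linear scan with a binary search over ascending thresholds (alternative decomposition; same cost at n=12).
def sizeDict : PySem.Dict Int String :=
  PySem.Dict.ofList [(4, "poppy seed"), (6, "lentil"), (8, "raspberry"), (10, "strawberry"),
    (12, "lime"), (16, "avocado"), (20, "banana"), (24, "ear of corn"),
    (28, "eggplant"), (32, "squash"), (36, "cantaloupe"), (40, "watermelon")]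

-- the 'for w in sorted(...): if week >= w: return ...' loop
def gbsLoop (week : Int) : List Int → String
  | [] => "tiny seed"
  | w :: rest => if week ≥ w then (PySem.Dict.get? sizeDict w).getD "" else gbsLoop week rest

def get_baby_size (week : Int) : String :=
  gbsLoop week (PySem.List.sorted (PySem.Dict.keys sizeDict) (fun k => k) true)

-- ===== PORT B =====
def bThresholds : List Int := [4, 6, 8, 10, 12, 16, 20, 24, 28, 32, 36, 40]
def bNames : List String := ["poppy seed", "lentil", "raspberry", "strawberry", "lime", "avocado",
  "banana", "ear of corn", "eggplant", "squash", "cantaloupe", "watermelon"]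

-- the 'while lo < hi' bisect_right loop of Source B
def bSearch (week : Int) (lo hi : Nat) : Nat :=
  if _h : lo < hi then
    let mid := (lo + hi) / 2
    if bThresholds.getD mid 0 ≤ week then bSearch week (mid + 1) hi
    else bSearch week lo mid
  else lo
termination_by hi - lo
decreasing_by all_goals omega

def get_baby_size_alt (week : Int) : String :=
  let lo := bSearch week 0 bThresholds.length
  if lo = 0 then "tiny seed" else bNames.getD (lo - 1) ""

-- ===== PRECONDITION & SPEC =====
def Spec_get_baby_size (week : Int) (out : String) : Prop := out = get_baby_size_alt week
instance (week : Int) (out : String) : Decidable (Spec_get_baby_size week out) := by unfold Spec_get_baby_size; infer_instance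

-- ===== CLAIM (what is proved, stated in full; the proofs are below) =====
def Claim_equal_get_baby_size : Prop := ∀ (week : Int), Dom_get_baby_size week → Spec_get_baby_size week (get_baby_size week)

-- ===== LEMMAS AND PROOFS =====

-- ===== VERDICT (by name: the statement is the Claim_ definition above) =====
theorem gbs_keys_sorted :
    PySem.List.sorted (PySem.Dict.keys sizeDict) (fun k => k) true
      = [40, 36, 32, 28, 24, 20, 16, 12, 10, 8, 6, 4] := by decide

set_option maxHeartbeats 1000000 in
set_option maxRecDepth 4000 in
theorem gbs_eq (week : Int) : get_baby_size week = get_baby_size_alt week := by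
  simp only [get_baby_size, gbs_keys_sorted, get_baby_size_alt]
  simp only [gbsLoop, ge_iff_le]
  norm_num [sizeDict, PySem.Dict.ofList, PySem.Dict.get?]
  by_cases h40 : (40:Int) ≤ week
  · simp [bSearch, bThresholds, bNames, show ((4:Int) ≤ week) from by omega, show ((6:Int) ≤ week) from by omega, show ((8:Int) ≤ week) from by omega, show ((10:Int) ≤ week) from by omega, show ((12:Int) ≤ week) from by omega, show ((16:Int) ≤ week) from by omega, show ((20:Int) ≤ week) from by omega, show ((24:Int) ≤ week) from by omega, show ((28:Int) ≤ week) from by omega, show ((32:Int) ≤ week) from by omega, show ((36:Int) ≤ week) from by omega, show ((40:Int) ≤ week) from by omega] <;> decide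
  by_cases h36 : (36:Int) ≤ week
  · simp [bSearch, bThresholds, bNames, show ((4:Int) ≤ week) from by omega, show ((6:Int) ≤ week) from by omega, show ((8:Int) ≤ week) from by omega, show ((10:Int) ≤ week) from by omega, show ((12:Int) ≤ week) from by omega, show ((16:Int) ≤ week) from by omega, show ((20:Int) ≤ week) from by omega, show ((24:Int) ≤ week) from by omega, show ((28:Int) ≤ week) from by omega, show ((32:Int) ≤ week) from by omega, show ((36:Int) ≤ week) from by omega, show ¬((40:Int) ≤ week) from by omega] <;> decide
  by_cases h32 : (32:Int) ≤ week
  · simp [bSearch, bThresholds, bNames, show ((4:Int) ≤ week) from by omega, show ((6:Int) ≤ week) from by omega, show ((8:Int) ≤ week) from by omega, show ((10:Int) ≤ week) from by omega, show ((12:Int) ≤ week) from by omega, show ((16:Int) ≤ week) from by omega, show ((20:Int) ≤ week) from by omega, show ((24:Int) ≤ week) from by omega, show ((28:Int) ≤ week) from by omega, show ((32:Int) ≤ week) from by omega, show ¬((36:Int) ≤ week) from by omega, show ¬((40:Int) ≤ week) from by omega] <;> decide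
  by_cases h28 : (28:Int) ≤ week
  · simp [bSearch, bThresholds, bNames, show ((4:Int) ≤ week) from by omega, show ((6:Int) ≤ week) from by omega, show ((8:Int) ≤ week) from by omega, show ((10:Int) ≤ week) from by omega, show ((12:Int) ≤ week) from by omega, show ((16:Int) ≤ week) from by omega, show ((20:Int) ≤ week) from by omega, show ((24:Int) ≤ week) from by omega, show ((28:Int) ≤ week) from by omega, show ¬((32:Int) ≤ week) from by omega, show ¬((36:Int) ≤ week) from by omega, show ¬((40:Int) ≤ week) from by omega] <;> decide
  by_cases h24 : (24:Int) ≤ week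
  · simp [bSearch, bThresholds, bNames, show ((4:Int) ≤ week) from by omega, show ((6:Int) ≤ week) from by omega, show ((8:Int) ≤ week) from by omega, show ((10:Int) ≤ week) from by omega, show ((12:Int) ≤ week) from by omega, show ((16:Int) ≤ week) from by omega, show ((20:Int) ≤ week) from by omega, show ((24:Int) ≤ week) from by omega, show ¬((28:Int) ≤ week) from by omega, show ¬((32:Int) ≤ week) from by omega, show ¬((36:Int) ≤ week) from by omega, show ¬((40:Int) ≤ week) from by omega] <;> decide
  by_cases h20 : (20:Int) ≤ week
  · simp [bSearch, bThresholds, bNames, show ((4:Int) ≤ week) from by omega, show ((6:Int) ≤ week) from by omega, show ((8:Int) ≤ week) from by omega, show ((10:Int) ≤ week) from by omega, show ((12:Int) ≤ week) from by omega, show ((16:Int) ≤ week) from by omega, show ((20:Int) ≤ week) from by omega, show ¬((24:Int) ≤ week) from by omega, show ¬((28:Int) ≤ week) from by omega, show ¬((32:Int) ≤ week) from by omega, show ¬((36:Int) ≤ week) from by omega, show ¬((40:Int) ≤ week) from by omega] <;> decide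
  by_cases h16 : (16:Int) ≤ week
  · simp [bSearch, bThresholds, bNames, show ((4:Int) ≤ week) from by omega, show ((6:Int) ≤ week) from by omega, show ((8:Int) ≤ week) from by omega, show ((10:Int) ≤ week) from by omega, show ((12:Int) ≤ week) from by omega, show ((16:Int) ≤ week) from by omega, show ¬((20:Int) ≤ week) from by omega, show ¬((24:Int) ≤ week) from by omega, show ¬((28:Int) ≤ week) from by omega, show ¬((32:Int) ≤ week) from by omega, show ¬((36:Int) ≤ week) from by omega, show ¬((40:Int) ≤ week) from by omega] <;> decide
  by_cases h12 : (12:Int) ≤ week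
  · simp [bSearch, bThresholds, bNames, show ((4:Int) ≤ week) from by omega, show ((6:Int) ≤ week) from by omega, show ((8:Int) ≤ week) from by omega, show ((10:Int) ≤ week) from by omega, show ((12:Int) ≤ week) from by omega, show ¬((16:Int) ≤ week) from by omega, show ¬((20:Int) ≤ week) from by omega, show ¬((24:Int) ≤ week) from by omega, show ¬((28:Int) ≤ week) from by omega, show ¬((32:Int) ≤ week) from by omega, show ¬((36:Int) ≤ week) from by omega, show ¬((40:Int) ≤ week) from by omega] <;> decide
  by_cases h10 : (10:Int) ≤ week
  · simp [bSearch, bThresholds, bNames, show ((4:Int) ≤ week) from by omega, show ((6:Int) ≤ week) from by omega, show ((8:Int) ≤ week) from by omega, show ((10:Int) ≤ week) from by omega, show ¬((12:Int) ≤ week) from by omega, show ¬((16:Int) ≤ week) from by omega, show ¬((20:Int) ≤ week) from by omega, show ¬((24:Int) ≤ week) from by omega, show ¬((28:Int) ≤ week) from by omega, show ¬((32:Int) ≤ week) from by omega, show ¬((36:Int) ≤ week) from by omega, show ¬((40:Int) ≤ week) from by omega] <;> decide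
  by_cases h8 : (8:Int) ≤ week
  · simp [bSearch, bThresholds, bNames, show ((4:Int) ≤ week) from by omega, show ((6:Int) ≤ week) from by omega, show ((8:Int) ≤ week) from by omega, show ¬((10:Int) ≤ week) from by omega, show ¬((12:Int) ≤ week) from by omega, show ¬((16:Int) ≤ week) from by omega, show ¬((20:Int) ≤ week) from by omega, show ¬((24:Int) ≤ week) from by omega, show ¬((28:Int) ≤ week) from by omega, show ¬((32:Int) ≤ week) from by omega, show ¬((36:Int) ≤ week) from by omega, show ¬((40:Int) ≤ week) from by omega] <;> decide
  by_cases h6 : (6:Int) ≤ week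
  · simp [bSearch, bThresholds, bNames, show ((4:Int) ≤ week) from by omega, show ((6:Int) ≤ week) from by omega, show ¬((8:Int) ≤ week) from by omega, show ¬((10:Int) ≤ week) from by omega, show ¬((12:Int) ≤ week) from by omega, show ¬((16:Int) ≤ week) from by omega, show ¬((20:Int) ≤ week) from by omega, show ¬((24:Int) ≤ week) from by omega, show ¬((28:Int) ≤ week) from by omega, show ¬((32:Int) ≤ week) from by omega, show ¬((36:Int) ≤ week) from by omega, show ¬((40:Int) ≤ week) from by omega] <;> decide
  by_cases h4 : (4:Int) ≤ week
  · simp [bSearch, bThresholds, bNames, show ((4:Int) ≤ week) from by omega, show ¬((6:Int) ≤ week) from by omega, show ¬((8:Int) ≤ week) from by omega, show ¬((10:Int) ≤ week) from by omega, show ¬((12:Int) ≤ week) from by omega, show ¬((16:Int) ≤ week) from by omega, show ¬((20:Int) ≤ week) from by omega, show ¬((24:Int) ≤ week) from by omega, show ¬((28:Int) ≤ week) from by omega, show ¬((32:Int) ≤ week) from by omega, show ¬((36:Int) ≤ week) from by omega, show ¬((40:Int) ≤ week) from by omega] <;> decide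
  · simp [bSearch, bThresholds, bNames, show ¬((4:Int) ≤ week) from by omega, show ¬((6:Int) ≤ week) from by omega, show ¬((8:Int) ≤ week) from by omega, show ¬((10:Int) ≤ week) from by omega, show ¬((12:Int) ≤ week) from by omega, show ¬((16:Int) ≤ week) from by omega, show ¬((20:Int) ≤ week) from by omega, show ¬((24:Int) ≤ week) from by omega, show ¬((28:Int) ≤ week) from by omega, show ¬((32:Int) ≤ week) from by omega, show ¬((36:Int) ≤ week) from by omega, show ¬((40:Int) ≤ week) from by omega]

theorem get_baby_size_spec : Claim_equal_get_baby_size := by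
  intro week _
  unfold Spec_get_baby_size
  exact gbs_eq week
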